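-- pv_equiv track=rewrite | github.com/seunga03/boj-pg-solving | 프로그래머스/0/120853. 컨트롤 제트/컨트롤 제트.py | solution
-- ===== SOURCE A (Python) =====
-- def solution(s):
--     arr = s.split(' ')
--     stack = []
--     answer = 0
--
--     for a in arr:
--         if a != "Z":
--             stack.append(a)
--         else:
--             stack.pop()
--
--     for s in stack:
--         answer += int(s)
--     return answer
-- ===== SOURCE B (Python) =====
-- def solution(s):
--     skip = 0
--     total = 0
--     for t in reversed(s.split(' ')):
--         if t == "Z":
--             skip += 1
--         elif skip:
--             skip -= 1
--         else:
--             total += int(t)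
--     return total
-- ===== Notes on version B (the rewrite author's own statement) =====
-- stated objective: alternative
-- what changed: Replaced A's two-pass stack algorithm (build a token stack, then sum it) by a single right-to-left pass that keeps only a skip counter and a running total, converting only surviving tokens.
-- outside the precondition, e.g. on solution('Z'): A raises IndexError, B returns 0
import Mathlib
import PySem

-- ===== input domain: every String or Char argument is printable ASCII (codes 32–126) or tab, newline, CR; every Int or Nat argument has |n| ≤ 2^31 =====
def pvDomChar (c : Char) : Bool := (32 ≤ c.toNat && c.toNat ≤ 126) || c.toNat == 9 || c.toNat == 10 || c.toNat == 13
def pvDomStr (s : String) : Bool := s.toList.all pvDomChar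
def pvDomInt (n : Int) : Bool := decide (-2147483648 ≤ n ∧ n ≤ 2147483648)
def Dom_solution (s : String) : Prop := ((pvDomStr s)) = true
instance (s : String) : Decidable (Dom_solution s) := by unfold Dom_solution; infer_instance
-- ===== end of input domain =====

-- B replaces A's token stack and second summation pass by a single right-to-left pass
-- keeping only a skip counter and a running total (objective: alternative decomposition).


-- ===== PORT A =====
-- stack.pop() raises IndexError on an empty stack and int(t) raises ValueError on a
-- non-numeric survivor; both situations are excluded by Pre_solution, so dropLast and
-- (ofStr? t).getD 0 are exact on every admitted input.
def solution (s : String) : Int :=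
  let arr := (PySem.Str.split? s " ").getD []
  let stack := arr.foldl (fun st a => if a ≠ "Z" then st ++ [a] else st.dropLast) []
  stack.foldl (fun answer t => answer + (PySem.Int.ofStr? t).getD 0) 0

-- ===== PORT B =====
-- single reverse pass; state = (skip, total); int(t) only on surviving tokens
def solution_alt (s : String) : Int :=
  (((PySem.Str.split? s " ").getD []).reverse.foldl
    (fun (acc : Int × Int) t =>
      if t == "Z" then (acc.1 + 1, acc.2)
      else if acc.1 ≠ 0 then (acc.1 - 1, acc.2)
      else (acc.1, acc.2 + (PySem.Int.ofStr? t).getD 0)) ((0 : Int), (0 : Int))).2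

-- ===== PRECONDITION & SPEC =====
-- pvBal ts k = (#non-"Z" tokens) − (#"Z" tokens) in the first k tokens ( = A's stack size there)
def pvBal (ts : List String) (k : Nat) : Int :=
  (((ts.take k).countP (· != "Z") : Int)) - (((ts.take k).count "Z" : Int))

-- Pre_ excludes exactly the inputs where Python A raises: a "Z" arriving on an empty stack
-- (IndexError from pop) and a surviving token that int() cannot parse (ValueError).
def Pre_solution (s : String) : Prop :=
  let ts := (PySem.Str.split? s " ").getD []
  (∀ k ∈ List.range (ts.length + 1), 0 ≤ pvBal ts k) ∧
  (∀ i ∈ List.range ts.length,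
     ts.getD i "" ≠ "Z" →
     (∀ k ∈ List.range (ts.length + 1), i < k → pvBal ts (i + 1) ≤ pvBal ts k) →
     (PySem.Int.ofStr? (ts.getD i "")).isSome = true)
instance (s : String) : Decidable (Pre_solution s) := by unfold Pre_solution; infer_instance

def pvWitness_solution : String := "1 2 Z 3"

def Spec_solution (s : String) (out : Int) : Prop := out = solution_alt s
instance (s : String) (out : Int) : Decidable (Spec_solution s out) := by unfold Spec_solution; infer_instance

-- ===== CLAIM (what is proved, stated in full; the proofs are below) =====
def Claim_equal_solution : Prop := ∀ (s : String), Dom_solution s → Pre_solution s → Spec_solution s (solution s)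

-- ===== LEMMAS AND PROOFS =====

-- abbreviations used only by the proofs
def pvToD (t : String) : Int := (PySem.Int.ofStr? t).getD 0
def pvStk (ts : List String) : List String :=
  ts.foldl (fun st a => if a ≠ "Z" then st ++ [a] else st.dropLast) []
def pvGo (acc : Int × Int) (t : String) : Int × Int :=
  if t == "Z" then (acc.1 + 1, acc.2)
  else if acc.1 ≠ 0 then (acc.1 - 1, acc.2)
  else (acc.1, acc.2 + (PySem.Int.ofStr? t).getD 0)

theorem pvStk_append (ts : List String) (t : String) :
    pvStk (ts ++ [t]) = if t ≠ "Z" then pvStk ts ++ [t] else (pvStk ts).dropLast := by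
  simp [pvStk, List.foldl_append]

-- key invariant: running B's loop over rs with skip k and total tot adds the sum of the
-- values of A's stack for rs.reverse with its last k elements removed
theorem pvInv (rs : List String) (k : Nat) (tot : Int) :
    (rs.foldl pvGo ((k : Int), tot)).2
      = tot + (((pvStk rs.reverse).take ((pvStk rs.reverse).length - k)).map pvToD).sum := by
  induction rs generalizing k tot with
  | nil => simp [pvStk]
  | cons t rs' ih =>
    have hrev : (t :: rs').reverse = rs'.reverse ++ [t] := by simp
    rw [List.foldl_cons]
    by_cases hz : t = "Z"
    · subst hz
      have h1 : pvGo ((k : Int), tot) "Z" = (((k + 1 : Nat) : Int), tot) := by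
        simp [pvGo]
      rw [h1, ih]
      rw [hrev, pvStk_append]
      simp only [ne_eq, not_true_eq_false, if_false]
      have hS : ((pvStk rs'.reverse).dropLast).take ((pvStk rs'.reverse).dropLast.length - k)
          = (pvStk rs'.reverse).take ((pvStk rs'.reverse).length - (k + 1)) := by
        rw [List.dropLast_eq_take, List.length_take, List.take_take]
        congr 1
        omega
      rw [hS]
    · rcases Nat.eq_zero_or_pos k with hk | hk
      · subst hk
        have h1 : pvGo (((0 : Nat) : Int), tot) t = (((0 : Nat) : Int), tot + pvToD t) := by
          simp [pvGo, pvToD, hz]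
        rw [h1, ih]
        rw [hrev, pvStk_append, if_pos hz]
        simp only [Nat.sub_zero, List.take_length, List.map_append, List.sum_append,
          List.map_cons, List.map_nil, List.sum_cons, List.sum_nil]
        ring
      · obtain ⟨k', rfl⟩ : ∃ k', k = k' + 1 := ⟨k - 1, by omega⟩
        have h1 : pvGo (((k' + 1 : Nat) : Int), tot) t = (((k' : Nat) : Int), tot) := by
          simp [pvGo, hz]
          omega
        rw [h1, ih, hrev, pvStk_append, if_pos hz]
        have hS : (pvStk rs'.reverse ++ [t]).take ((pvStk rs'.reverse ++ [t]).length - (k' + 1))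
            = (pvStk rs'.reverse).take ((pvStk rs'.reverse).length - k') := by
          have hlen : (pvStk rs'.reverse ++ [t]).length = (pvStk rs'.reverse).length + 1 := by simp
          rw [hlen, show (pvStk rs'.reverse).length + 1 - (k' + 1) = (pvStk rs'.reverse).length - k' by omega,
            List.take_append_of_le_length (by omega)]
        rw [hS]

theorem pvEq (s : String) : solution s = solution_alt s := by
  unfold solution solution_alt
  have h := pvInv ((PySem.Str.split? s " ").getD []).reverse 0 0
  rw [List.reverse_reverse] at h
  show (pvStk ((PySem.Str.split? s " ").getD [])).foldl (fun answer t => answer + (PySem.Int.ofStr? t).getD 0) 0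
      = (((PySem.Str.split? s " ").getD []).reverse.foldl pvGo ((0 : Int), (0 : Int))).2
  rw [show ((0:Int), (0:Int)) = (((0:Nat) : Int), (0:Int)) by norm_num, h]
  simp only [PySem.List.foldl_add]
  simp [List.take_length]
  rfl

-- ===== VERDICT (by name: the statement is the Claim_ definition above) =====
theorem solution_spec : Claim_equal_solution := by
  intro s _ _
  unfold Spec_solution
  exact pvEq s
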